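-- pv_equiv track=rewrite | github.com/AndreAugustoSak/OBI2008_2 | Questao_06.py | escadinha
-- ===== SOURCE A (Python) =====
-- def escadinha(tam_lista, lista):
--     quantidade = 1
--     if tam_lista == 1 or tam_lista == 2:
--         quantidade = quantidade
--     else:
--         difAtual = lista[0] - lista[1]
--         for indice in range(1, tam_lista - 1):
--             difNova = lista[indice] - lista[indice + 1]
--             if difAtual != difNova:
--                 difAtual = difNova
--                 quantidade += 1
--     return quantidade
-- ===== SOURCE B (Python) =====
-- def escadinha(tam_lista, lista):
--     if tam_lista <= 2:
--         return 1
--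
--     # number of runs of equal values in the difference sequence
--     # d[i] = lista[i] - lista[i+1], over the index window [lo, hi)
--     def runs(lo, hi):
--         if hi - lo <= 1:
--             return 1
--         mid = (lo + hi) // 2
--         d_left = lista[mid - 1] - lista[mid]
--         d_right = lista[mid] - lista[mid + 1]
--         return runs(lo, mid) + runs(mid, hi) - (1 if d_left == d_right else 0)
--
--     return runs(0, tam_lista - 1)
-- ===== Notes on version B (the rewrite author's own statement) =====
-- stated objective: alternative
-- what changed: B replaces A's single left-to-right scan with a running current-difference accumulator by a divide-and-conquer recursion that counts runs of equal differences in each half of the index window and merges the two counts, subtracting one when the difference run continues across the midpoint.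
import Mathlib
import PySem

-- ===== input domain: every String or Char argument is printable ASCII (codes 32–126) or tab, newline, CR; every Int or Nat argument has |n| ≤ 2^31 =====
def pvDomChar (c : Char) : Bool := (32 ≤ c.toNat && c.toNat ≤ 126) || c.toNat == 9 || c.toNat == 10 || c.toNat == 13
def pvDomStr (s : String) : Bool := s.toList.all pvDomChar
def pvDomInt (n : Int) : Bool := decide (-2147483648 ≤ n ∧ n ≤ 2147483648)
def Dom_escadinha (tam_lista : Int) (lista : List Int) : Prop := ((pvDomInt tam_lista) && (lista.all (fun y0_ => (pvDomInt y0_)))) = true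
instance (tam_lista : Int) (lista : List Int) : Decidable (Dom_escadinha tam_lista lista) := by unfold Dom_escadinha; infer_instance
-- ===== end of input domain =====

-- B replaces A's single accumulator scan by a divide-and-conquer recursion that counts runs
-- of equal consecutive differences in each half and merges across the midpoint; same cost,
-- a genuinely different algorithm.

-- ===== PORT A =====
def escadinha (tam_lista : Int) (lista : List Int) : Int :=
  if tam_lista = 1 ∨ tam_lista = 2 then 1
  else
    let difAtual := PySem.List.pyGetD lista 0 0 - PySem.List.pyGetD lista 1 0
    let st := (PySem.List.pyRange 1 (tam_lista - 1) 1).foldl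
      (fun (st : Int × Int) indice =>
        let difNova := PySem.List.pyGetD lista indice 0 - PySem.List.pyGetD lista (indice + 1) 0
        if st.1 ≠ difNova then (difNova, st.2 + 1) else st)
      (difAtual, 1)
    st.2

-- ===== PORT B =====
-- number of runs of equal values in the difference sequence d[i] = lista[i] - lista[i+1]
-- over the index window [lo, hi)  (transcription of Source B's inner 'runs')
def escAltRuns (lista : List Int) (lo hi : Int) : Int :=
  if h : hi - lo ≤ 1 then 1
  else
    let mid := PySem.Int.floordiv (lo + hi) 2
    let dLeft := PySem.List.pyGetD lista (mid - 1) 0 - PySem.List.pyGetD lista mid 0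
    let dRight := PySem.List.pyGetD lista mid 0 - PySem.List.pyGetD lista (mid + 1) 0
    escAltRuns lista lo mid + escAltRuns lista mid hi - (if dLeft = dRight then 1 else 0)
termination_by (hi - lo).toNat
decreasing_by
  all_goals
    simp only [PySem.Int.floordiv_eq_ediv_of_pos (a := lo + hi) (by omega : (0:Int) < 2)]
    omega

def escadinha_alt (tam_lista : Int) (lista : List Int) : Int :=
  if tam_lista ≤ 2 then 1
  else escAltRuns lista 0 (tam_lista - 1)

-- ===== PRECONDITION & SPEC =====
-- Pre_ excludes exactly the inputs where A raises IndexError: tam_lista outside {1,2}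
-- with a list too short for the indices 0..tam_lista-1 that A reads.
def Pre_escadinha (tam_lista : Int) (lista : List Int) : Prop :=
  tam_lista = 1 ∨ tam_lista = 2 ∨ (2 ≤ lista.length ∧ tam_lista ≤ (lista.length : Int))
instance (tam_lista : Int) (lista : List Int) : Decidable (Pre_escadinha tam_lista lista) := by
  unfold Pre_escadinha; infer_instance
def pvWitness_escadinha : Int × List Int := (4, [7, 5, 3, 2])

def Spec_escadinha (tam_lista : Int) (lista : List Int) (out : Int) : Prop := out = escadinha_alt tam_lista lista
instance (tam_lista : Int) (lista : List Int) (out : Int) : Decidable (Spec_escadinha tam_lista lista out) := by unfold Spec_escadinha; infer_instance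

-- ===== CLAIM (what is proved, stated in full; the proofs are below) =====
def Claim_equal_escadinha : Prop := ∀ (tam_lista : Int) (lista : List Int), Dom_escadinha tam_lista lista → Pre_escadinha tam_lista lista → Spec_escadinha tam_lista lista (escadinha tam_lista lista)

-- ===== LEMMAS AND PROOFS =====

-- the difference sequence both programs read
def pvDiff (lista : List Int) (i : Int) : Int :=
  PySem.List.pyGetD lista i 0 - PySem.List.pyGetD lista (i + 1) 0

-- number of boundary changes of pvDiff on the index window (a, b), as a sum
def pvChg (lista : List Int) (a b : Int) : Int :=
  ((PySem.List.pyRange a b 1).map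
    (fun i => if pvDiff lista i ≠ pvDiff lista (i - 1) then (1:Int) else 0)).sum

-- A's fold over [1, …, m] carries (last difference, count); its result is the last value of f
-- together with the fold counting adjacent changes.
lemma escadinha_fold_pair (f : Int → Int) (m : Nat) : ∀ q : Int,
    (PySem.List.pyRange 1 (1 + (m : Int)) 1).foldl
        (fun (st : Int × Int) i => if st.1 ≠ f i then (f i, st.2 + 1) else st) (f 0, q)
      = (f (m : Int), q + (PySem.List.pyRange 1 (1 + (m : Int)) 1).foldl
          (fun acc i => if f i ≠ f (i - 1) then acc + 1 else acc) 0) := by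
  induction m with
  | zero =>
      intro q
      rw [PySem.List.pyRange_one_eq_nil (by omega)]
      simp
  | succ m ih =>
      intro q
      have hm : ((1 : Int) + ((m + 1 : Nat) : Int)) = (1 + (m : Int)) + 1 := by push_cast; ring
      have hle : (1 : Int) ≤ 1 + (m : Int) := by omega
      rw [hm, PySem.List.pyRange_one_succ_right hle, List.foldl_append, List.foldl_append, ih,
        List.foldl_cons, List.foldl_nil, List.foldl_cons, List.foldl_nil]
      have hsub : (1 + (m : Int)) - 1 = (m : Int) := by ring
      rw [hsub, show (((m + 1 : Nat)) : Int) = 1 + (m : Int) from by push_cast; ring]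
      dsimp only
      rcases eq_or_ne (f (m : Int)) (f (1 + (m : Int))) with h | h
      · rw [if_neg (by simp [h]), if_neg (by simp [h.symm]), h]
      · rw [if_pos h, if_pos (Ne.symm h)]
        refine Prod.ext rfl ?_
        simp only
        ring

-- A's result as 1 + the change sum
lemma escadinha_count (lista : List Int) (m : Nat) :
    ((PySem.List.pyRange 1 (1 + (m : Int)) 1).foldl
        (fun (st : Int × Int) i =>
          if st.1 ≠ pvDiff lista i then (pvDiff lista i, st.2 + 1) else st) (pvDiff lista 0, 1)).2
      = 1 + pvChg lista 1 (1 + (m : Int)) := by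
  rw [escadinha_fold_pair (pvDiff lista) m 1]
  unfold pvChg
  rw [show (fun (acc : Int) i => if pvDiff lista i ≠ pvDiff lista (i - 1) then acc + 1 else acc)
      = fun acc i => acc + (if pvDiff lista i ≠ pvDiff lista (i - 1) then (1:Int) else 0) from by
    funext acc i; split_ifs <;> simp]
  rw [PySem.List.foldl_add]
  ring

-- B's divide-and-conquer equals 1 + the change sum on (lo, hi)
lemma escAltRuns_eq (lista : List Int) : ∀ (n : Nat) (lo hi : Int), (hi - lo).toNat = n →
    lo < hi → escAltRuns lista lo hi = 1 + pvChg lista (lo + 1) hi := by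
  intro n
  induction n using Nat.strong_induction_on with
  | _ n ih =>
    intro lo hi hn hlt
    rw [escAltRuns]
    by_cases h1 : hi - lo ≤ 1
    · rw [dif_pos h1]
      have : hi = lo + 1 := by omega
      rw [this]
      unfold pvChg
      rw [PySem.List.pyRange_one_eq_nil (by omega)]
      simp
    · rw [dif_neg h1]
      have h2 : 2 ≤ hi - lo := by omega
      have hmid : PySem.Int.floordiv (lo + hi) 2 = (lo + hi) / 2 :=
        PySem.Int.floordiv_eq_ediv_of_pos (by omega)
      have hb1 : lo + 1 ≤ PySem.Int.floordiv (lo + hi) 2 := by rw [hmid]; omega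
      have hb2 : PySem.Int.floordiv (lo + hi) 2 + 1 ≤ hi := by rw [hmid]; omega
      show escAltRuns lista lo (PySem.Int.floordiv (lo + hi) 2)
            + escAltRuns lista (PySem.Int.floordiv (lo + hi) 2) hi
            - (if PySem.List.pyGetD lista (PySem.Int.floordiv (lo + hi) 2 - 1) 0
                  - PySem.List.pyGetD lista (PySem.Int.floordiv (lo + hi) 2) 0
                = PySem.List.pyGetD lista (PySem.Int.floordiv (lo + hi) 2) 0
                  - PySem.List.pyGetD lista (PySem.Int.floordiv (lo + hi) 2 + 1) 0
               then 1 else 0)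
          = 1 + pvChg lista (lo + 1) hi
      generalize PySem.Int.floordiv (lo + hi) 2 = mid at hb1 hb2 ⊢
      rw [ih ((mid - lo).toNat) (by omega) lo mid rfl (by omega),
          ih ((hi - mid).toNat) (by omega) mid hi rfl (by omega)]
      have hsplit : pvChg lista (lo + 1) hi
          = pvChg lista (lo + 1) mid
            + (if pvDiff lista mid ≠ pvDiff lista (mid - 1) then (1:Int) else 0)
            + pvChg lista (mid + 1) hi := by
        unfold pvChg
        rw [PySem.List.pyRange_one_append (lo + 1) mid hi hb1 (by omega),
            PySem.List.pyRange_one_append mid (mid + 1) hi (by omega) hb2,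
            PySem.List.pyRange_one_singleton]
        simp [add_assoc]
      rw [hsplit]
      have hd : pvDiff lista (mid - 1)
          = PySem.List.pyGetD lista (mid - 1) 0 - PySem.List.pyGetD lista mid 0 := by
        unfold pvDiff
        rw [show mid - 1 + 1 = mid from by ring]
      rw [show PySem.List.pyGetD lista mid 0 - PySem.List.pyGetD lista (mid + 1) 0
            = pvDiff lista mid from rfl, ← hd]
      rcases eq_or_ne (pvDiff lista (mid - 1)) (pvDiff lista mid) with h | h
      · rw [if_pos h, if_neg (by simp [h])]
        ring
      · rw [if_neg h, if_pos (Ne.symm h)]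
        ring

-- ===== VERDICT (by name: the statement is the Claim_ definition above) =====
theorem escadinha_spec : Claim_equal_escadinha := by
  intro tam lista _ hpre
  unfold Spec_escadinha escadinha escadinha_alt
  by_cases h12 : tam = 1 ∨ tam = 2
  · rw [if_pos h12, if_pos (by omega)]
  · rw [if_neg h12]
    by_cases h3 : 3 ≤ tam
    · rw [if_neg (by omega)]
      set m : Nat := (tam - 2).toNat with hmdef
      have hm1 : tam - 1 = 1 + (m : Int) := by omega
      rw [hm1]
      refine (escadinha_count lista m).trans ?_
      rw [escAltRuns_eq lista ((1 + (m : Int) - 0).toNat) 0 (1 + (m : Int)) rfl (by omega)]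
      norm_num
    · -- degenerate case tam ≤ 0: A's loop range is empty, B's guard fires; both are 1
      have ht0 : tam ≤ 0 := by
        rcases hpre with h | h | ⟨hl, hle⟩ <;> omega
      rw [if_pos (by omega), PySem.List.pyRange_one_eq_nil (by omega)]
      simp
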